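-- pv_equiv track=rewrite | github.com/Riya-1106/CampusCurb | backend/app.py | _build_college_key
-- ===== SOURCE A (Python) =====
-- from typing import List, Dict, Optional, Any
--
-- def _normalize_domain(value: str) -> str:
--     domain = value.strip().lower()
--     if domain.startswith("@"):
--         domain = domain[1:]
--     if "/" in domain:
--         domain = domain.split("/", 1)[0]
--     return domain
--
-- def _email_domain(email: str) -> str:
--     normalized = email.strip().lower()
--     if "@" not in normalized:
--         return ""
--     return _normalize_domain(normalized.rsplit("@", 1)[1])
--
-- def _normalize_college_key(value: str) -> str:
--     cleaned = "".join(ch if ch.isalnum() else "-" for ch in value.strip().lower())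
--     while "--" in cleaned:
--         cleaned = cleaned.replace("--", "-")
--     return cleaned.strip("-")
--
-- def _build_college_key(college_name: str, email: str, domains: List[str]) -> str:
--     normalized_domains = [_normalize_domain(d) for d in domains if _normalize_domain(d)]
--     if normalized_domains:
--         return _normalize_college_key(normalized_domains[0])
--
--
--     email_domain = _email_domain(email)
--     if email_domain:
--         return _normalize_college_key(email_domain)
--
--
--     if college_name.strip():
--         return _normalize_college_key(college_name)
--
--
--     return ""
-- ===== SOURCE B (Python) =====
-- from typing import List
--
-- def _normalize_domain(value: str) -> str:
--     domain = value.strip().lower()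
--     if domain.startswith("@"):
--         domain = domain[1:]
--     if "/" in domain:
--         domain = domain.split("/", 1)[0]
--     return domain
--
-- def _email_domain(email: str) -> str:
--     normalized = email.strip().lower()
--     if "@" not in normalized:
--         return ""
--     return _normalize_domain(normalized.rsplit("@", 1)[1])
--
-- def _normalize_college_key(value: str) -> str:
--     # single linear pass: emit alnum chars, collapse every non-alnum run to one '-'
--     out = []
--     for ch in value.strip().lower():
--         if ch.isalnum():
--             out.append(ch)
--         elif not out or out[-1] != "-":
--             out.append("-")
--     return "".join(out).strip("-")
--
-- def _build_college_key(college_name: str, email: str, domains: List[str]) -> str: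
--     for d in domains:
--         nd = _normalize_domain(d)
--         if nd:
--             return _normalize_college_key(nd)
--
--     email_domain = _email_domain(email)
--     if email_domain:
--         return _normalize_college_key(email_domain)
--
--     if college_name.strip():
--         return _normalize_college_key(college_name)
--
--     return ""
-- ===== Notes on version B (the rewrite author's own statement) =====
-- stated objective: faster
-- what changed: _normalize_college_key collapses dash runs in one linear pass with a last-emitted-char check instead of repeatedly rescanning and rewriting the whole string with `while "--" in cleaned: replace`, and the domain dispatch returns on the first non-empty normalized domain instead of building the full normalized list first.
import Mathlib
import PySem

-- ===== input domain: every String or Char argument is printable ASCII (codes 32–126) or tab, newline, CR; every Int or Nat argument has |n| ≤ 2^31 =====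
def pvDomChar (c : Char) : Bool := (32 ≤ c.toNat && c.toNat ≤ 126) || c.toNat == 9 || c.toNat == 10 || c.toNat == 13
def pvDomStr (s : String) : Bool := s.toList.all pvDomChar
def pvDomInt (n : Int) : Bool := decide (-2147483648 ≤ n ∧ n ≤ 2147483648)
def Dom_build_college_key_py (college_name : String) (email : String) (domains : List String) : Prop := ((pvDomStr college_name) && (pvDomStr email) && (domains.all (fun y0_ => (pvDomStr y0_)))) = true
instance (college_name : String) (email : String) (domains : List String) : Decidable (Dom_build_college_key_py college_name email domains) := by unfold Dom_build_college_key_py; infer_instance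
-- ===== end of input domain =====

-- B replaces the quadratic `while "--" in cleaned: replace("--","-")` rescans by one
-- linear pass that collapses dash runs as it emits, and returns on the first non-empty
-- normalized domain instead of materialising the whole normalized list (objective: faster).

-- ===== PORT A =====
-- shared helper (identical in A and B): _normalize_domain
def normalize_domain (value : String) : String :=
  let d0 := PySem.Chars.lower (PySem.Chars.strip value.toList)
  let d1 := if PySem.Chars.startswith d0 ['@'] then PySem.Chars.slice d0 (some 1) none else d0
  let d2 := if PySem.Chars.isIn ['/'] d1 then (PySem.Chars.splitOnMax d1 ['/'] 1).headD d1 else d1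
  String.ofList d2

-- shared helper (identical in A and B): _email_domain
-- normalized.rsplit("@", 1)[1] is ported by hand as 'everything after the LAST "@"'
-- (exact here: maxsplit = 1 and the branch guarantees "@" occurs, so rfind ≥ 0).
def email_domain (email : String) : String :=
  let normalized := PySem.Chars.lower (PySem.Chars.strip email.toList)
  if PySem.Chars.isIn ['@'] normalized = false then ""
  else normalize_domain (String.ofList (PySem.Chars.slice normalized (some (PySem.Chars.rfind normalized ['@'] + 1)) none))

-- the `while "--" in cleaned:` loop; fuel = cleaned.length is enough: each iteration
-- with "--" present shortens the string by at least one character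
def normKeyLoop : Nat → List Char → List Char
  | 0, s => s
  | fuel + 1, s =>
      if PySem.Chars.isIn ['-', '-'] s then normKeyLoop fuel (PySem.Chars.replace s ['-', '-'] ['-'])
      else s

def normalize_college_key (value : String) : String :=
  let cleaned := (PySem.Chars.lower (PySem.Chars.strip value.toList)).map
    (fun ch => if PySem.Chars.isalnum ch then ch else '-')
  String.ofList (PySem.Chars.stripChars (normKeyLoop cleaned.length cleaned) ['-'])

def build_college_key_py (college_name : String) (email : String) (domains : List String) : String :=
  let normalized_domains := (domains.filter (fun d => normalize_domain d != "")).map normalize_domain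
  match normalized_domains with
  | nd :: _ => normalize_college_key nd
  | [] =>
    let ed := email_domain email
    if ed != "" then normalize_college_key ed
    else if PySem.Chars.strip college_name.toList != [] then normalize_college_key college_name
    else ""

-- ===== PORT B =====
def normalize_college_key_alt (value : String) : String :=
  let out := (PySem.Chars.lower (PySem.Chars.strip value.toList)).foldl
    (fun acc ch =>
      if PySem.Chars.isalnum ch then acc ++ [ch]
      else if acc.isEmpty || PySem.List.pyGet? acc (-1) != some '-' then acc ++ ['-']
      else acc) []
  String.ofList (PySem.Chars.stripChars out ['-'])

def firstDomainKey : List String → Option String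
  | [] => none
  | d :: rest =>
      let nd := normalize_domain d
      if nd != "" then some (normalize_college_key_alt nd) else firstDomainKey rest

def build_college_key_py_alt (college_name : String) (email : String) (domains : List String) : String :=
  match firstDomainKey domains with
  | some k => k
  | none =>
    let ed := email_domain email
    if ed != "" then normalize_college_key_alt ed
    else if PySem.Chars.strip college_name.toList != [] then normalize_college_key_alt college_name
    else ""

-- ===== PRECONDITION & SPEC =====
def Spec_build_college_key_py (college_name : String) (email : String) (domains : List String) (out : String) : Prop := out = build_college_key_py_alt college_name email domains
instance (college_name : String) (email : String) (domains : List String) (out : String) : Decidable (Spec_build_college_key_py college_name email domains out) := by unfold Spec_build_college_key_py; infer_instance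

-- ===== CLAIM (what is proved, stated in full; the proofs are below) =====
def Claim_equal_build_college_key_py : Prop := ∀ (college_name : String) (email : String) (domains : List String), Dom_build_college_key_py college_name email domains → Spec_build_college_key_py college_name email domains (build_college_key_py college_name email domains)

-- ===== LEMMAS AND PROOFS =====

def repDD : List Char → List Char
  | [] => []
  | '-' :: '-' :: t => '-' :: repDD t
  | c :: t => c :: repDD t
def col : Bool → List Char → List Char
  | _, [] => []
  | b, c :: t => if c ≠ '-' then c :: col false t else if b then col true t else '-' :: col true t

theorem repDD_cons_ne (c : Char) (t : List Char) (hc : c ≠ '-') :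
    repDD (c :: t) = c :: repDD t := by
  rw [repDD.eq_def]; split <;> simp_all

theorem repDD_dash_cons_ne (d : Char) (t : List Char) (hd : d ≠ '-') :
    repDD ('-' :: d :: t) = '-' :: repDD (d :: t) := by
  rw [repDD.eq_def]
  split <;> simp_all
  tauto

theorem replace_go_eq_repDD (fuel : Nat) (l acc : List Char) (h : l.length ≤ fuel) :
    PySem.Chars.replace.go ['-', '-'] ['-'] fuel l acc = acc.reverse ++ repDD l := by
  induction fuel generalizing l acc with
  | zero =>
    have : l = [] := List.length_eq_zero_iff.mp (Nat.le_zero.mp h)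
    subst this; simp [PySem.Chars.replace.go, repDD]
  | succ n ih =>
    cases l with
    | nil => simp [PySem.Chars.replace.go, repDD]
    | cons c t =>
      by_cases hc : c = '-'
      · subst hc
        cases t with
        | nil =>
          cases n <;> simp [PySem.Chars.replace.go, List.isPrefixOf, repDD]
        | cons d t' =>
          by_cases hd : d = '-'
          · subst hd
            have hlen : t'.length ≤ n := by simp at h; omega
            simp [PySem.Chars.replace.go, List.isPrefixOf, ih _ _ hlen, repDD]
          · have hd2 : ('-' : Char) ≠ d := Ne.symm hd
            have hlen : (d :: t').length ≤ n := Nat.le_of_succ_le_succ h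
            rw [repDD_dash_cons_ne d t' hd]
            simp [PySem.Chars.replace.go, List.isPrefixOf, hd2, ih _ _ hlen]
      · have hc2 : ('-' : Char) ≠ c := Ne.symm hc
        have hlen : t.length ≤ n := Nat.le_of_succ_le_succ h
        rw [repDD_cons_ne c t hc]
        simp [PySem.Chars.replace.go, List.isPrefixOf, hc2, ih _ _ hlen]

theorem repDD_cons_eq (c : Char) (t : List Char)
    (hg : ∀ t₁, c = '-' → t = '-' :: t₁ → False) : repDD (c :: t) = c :: repDD t := by
  rw [repDD.eq_def]; split <;> simp_all

theorem repDD_length_le (l : List Char) : (repDD l).length ≤ l.length := by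
  induction l using repDD.induct with
  | case1 => simp [repDD]
  | case2 t ih => simp [repDD]; omega
  | case3 c t hg ih => rw [repDD_cons_eq c t hg]; simp; omega

theorem pyGet?_neg_one (xs : List Char) : PySem.List.pyGet? xs (-1) = xs.getLast? := by
  simp [PySem.List.pyGet?, PySem.List.pyIdx?]
  cases xs with
  | nil => simp
  | cons a t =>
    simp
    rw [List.getLast?_eq_getElem?]
    simp

theorem repDD_length_lt (l : List Char) (h : ['-', '-'] <:+: l) :
    (repDD l).length < l.length := by
  induction l using repDD.induct with
  | case1 => simp at h
  | case2 t ih => have := repDD_length_le t; simp [repDD]; omega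
  | case3 c t hg ih =>
    rw [repDD_cons_eq c t hg]
    have ht : ['-', '-'] <:+: t := by
      rcases List.infix_cons_iff.mp h with hp | hi
      · exfalso
        rcases hp with ⟨r, hr⟩
        cases hr
        exact hg _ rfl rfl
      · exact hi
    simpa using ih ht

theorem col_true_eq_of_head (t : List Char) (h : t.head? ≠ some '-') :
    col true t = col false t := by
  cases t with
  | nil => rfl
  | cons c u =>
    have hc : c ≠ '-' := by simpa using h
    simp [col, hc]

theorem col_repDD (l : List Char) : ∀ b, col b (repDD l) = col b l := by
  induction l using repDD.induct with
  | case1 => intro b; rfl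
  | case2 t ih =>
    intro b
    have h2 : repDD ('-' :: '-' :: t) = '-' :: repDD t := by simp [repDD]
    rw [h2]
    cases b <;> simp [col] <;> exact ih true
  | case3 c t hg ih =>
    intro b
    rw [repDD_cons_eq c t hg]
    by_cases hc : c = '-'
    · subst hc
      cases b <;> simp [col] <;> exact ih true
    · cases b <;> simp [col, hc] <;> exact ih false

theorem col_id_of_noDD (l : List Char) (h : ¬ ['-', '-'] <:+: l) : col false l = l := by
  induction l with
  | nil => rfl
  | cons c t ih =>
    have ht : ¬ ['-', '-'] <:+: t := fun hi => h (List.infix_cons_iff.mpr (Or.inr hi))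
    by_cases hc : c = '-'
    · subst hc
      have hh : t.head? ≠ some '-' := by
        intro he
        cases t with
        | nil => simp at he
        | cons d u =>
          simp at he
          subst he
          exact h ⟨[], u, rfl⟩
      simp [col, col_true_eq_of_head t hh, ih ht]
    · simp [col, hc, ih ht]

theorem replace_eq_repDD (l : List Char) :
    PySem.Chars.replace l ['-', '-'] ['-'] = repDD l := by
  rw [PySem.Chars.replace]
  simpa using replace_go_eq_repDD l.length l [] le_rfl

theorem normKeyLoop_eq_col (fuel : Nat) (l : List Char) (h : l.length ≤ fuel) :
    normKeyLoop fuel l = col false l := by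
  induction fuel generalizing l with
  | zero =>
    have : l = [] := List.length_eq_zero_iff.mp (Nat.le_zero.mp h)
    subst this; rfl
  | succ n ih =>
    rw [normKeyLoop]
    by_cases hin : PySem.Chars.isIn ['-', '-'] l = true
    · have hinf : ['-', '-'] <:+: l := (PySem.Chars.isIn_iff_infix _ _).mp hin
      have hlt := repDD_length_lt l hinf
      rw [if_pos hin, replace_eq_repDD, ih _ (by omega), col_repDD l false]
    · have hninf : ¬ ['-', '-'] <:+: l := by
        rw [← PySem.Chars.isIn_iff_infix]; simpa using hin
      rw [if_neg hin, col_id_of_noDD l hninf]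

theorem cond_eq (acc : List Char) :
    (acc.isEmpty || PySem.List.pyGet? acc (-1) != some '-') = !(acc.getLast? == some '-') := by
  cases acc with
  | nil => simp
  | cons a t => simp [pyGet?_neg_one, bne]

theorem isalnum_ne_dash (c : Char) (h : PySem.Chars.isalnum c = true) : c ≠ '-' := by
  intro he; subst he; revert h; decide

theorem fold_eq_col (cs : List Char) : ∀ acc : List Char,
    cs.foldl (fun acc ch =>
      if PySem.Chars.isalnum ch then acc ++ [ch]
      else if acc.isEmpty || PySem.List.pyGet? acc (-1) != some '-' then acc ++ ['-']
      else acc) acc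
    = acc ++ col (acc.getLast? == some '-')
        (cs.map (fun ch => if PySem.Chars.isalnum ch then ch else '-')) := by
  induction cs with
  | nil => intro acc; simp [col]
  | cons c t ih =>
    intro acc
    rw [List.foldl_cons, List.map_cons]
    by_cases hal : PySem.Chars.isalnum c = true
    · have hc : c ≠ '-' := isalnum_ne_dash c hal
      have hcb : (c == '-') = false := by simp [hc]
      rw [if_pos hal, ih (acc ++ [c]), if_pos hal]
      simp [col, hc, hcb]
    · have hal' : PySem.Chars.isalnum c = false := by simpa using hal
      have hout : (if PySem.Chars.isalnum c = true then c else '-') = '-' := by simp [hal']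
      rw [hout]
      by_cases hb : (acc.getLast? == some '-') = true
      · have hcnd : (acc.isEmpty || PySem.List.pyGet? acc (-1) != some '-') = false := by
          rw [cond_eq, hb]; rfl
        rw [if_neg (by simp [hal']), if_neg (by simp [hcnd]), ih acc, hb]
        simp [col]
      · have hbf : (acc.getLast? == some '-') = false := by simpa using hb
        have hcnd : (acc.isEmpty || PySem.List.pyGet? acc (-1) != some '-') = true := by
          rw [cond_eq, hbf]; rfl
        rw [if_neg (by simp [hal']), if_pos (by simp [hcnd]), ih (acc ++ ['-']), hbf]
        simp [col]

theorem normKey_eq_alt (v : String) : normalize_college_key v = normalize_college_key_alt v := by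
  simp only [normalize_college_key, normalize_college_key_alt]
  rw [normKeyLoop_eq_col _ _ le_rfl, fold_eq_col]
  simp

theorem firstDomainKey_eq (ds : List String) :
    firstDomainKey ds
      = (((ds.filter (fun d => normalize_domain d != "")).map normalize_domain).head?).map
          normalize_college_key_alt := by
  induction ds with
  | nil => rfl
  | cons d rest ih =>
    by_cases h : normalize_domain d = ""
    · simp [firstDomainKey, h, ih]
    · simp [firstDomainKey, h]

-- ===== VERDICT (by name: the statement is the Claim_ definition above) =====
theorem build_college_key_py_spec : Claim_equal_build_college_key_py := by
  intro cn em ds _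
  unfold Spec_build_college_key_py build_college_key_py build_college_key_py_alt
  rw [firstDomainKey_eq]
  cases h : (ds.filter (fun d => normalize_domain d != "")).map normalize_domain with
  | cons nd rest => simp [normKey_eq_alt]
  | nil => simp [normKey_eq_alt]
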